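-- pv_equiv track=rewrite | github.com/Ken-Yeung/eztool | OptionCrawler/main.py | closest_p
-- ===== SOURCE A (Python) =====
-- import math
--
-- def closest_p(price,lst, units): # not perfect in 3rd arg | units == 3 must work
--     assert units <= len(lst)
--     result = min(lst, key=lambda x:abs(x-price))
--     sort = sorted(lst)
--     close_lst = []
--     close_pos = ""
--     for i, data in enumerate(sort):
--         if data == result:
--             close_pos = i
--             break
--
--     if close_pos == 0:
--         close_lst = sort[:units]
--
--     elif close_pos == len(sort)-1:
--         close_lst = sort[-(units):]
--
--     else:
--         devided = units/2
--         foo = math.floor(devided)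
--         if units > 6:
--             foo = foo + 1
--         close_lst = sort[close_pos-foo:close_pos+math.ceil(devided)]
--
--     return close_lst
-- ===== SOURCE B (Python) =====
-- def _bisect_left(s, x):
--     lo, hi = 0, len(s)
--     while lo < hi:
--         mid = (lo + hi) // 2
--         if s[mid] < x:
--             lo = mid + 1
--         else:
--             hi = mid
--     return lo
--
--
-- def closest_p(price, lst, units):
--     assert units <= len(lst)
--     s = sorted(lst)
--     n = len(s)
--     i = _bisect_left(s, price)
--     if i == 0:
--         v = s[0]
--     elif i == n:
--         v = s[-1]
--     else:
--         a, b = s[i - 1], s[i]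
--         if price - a < b - price:
--             v = a
--         elif b - price < price - a:
--             v = b
--         else:
--             v = next(x for x in lst if x == a or x == b)
--     rank = _bisect_left(s, v)
--     if rank == 0:
--         lo, hi = 0, units
--     elif rank == n - 1:
--         lo, hi = -units, n
--     else:
--         half = units // 2
--         lo = rank - half - (1 if units > 6 else 0)
--         hi = rank + (units - half)
--     return s[lo:hi]
-- ===== Notes on version B (the rewrite author's own statement) =====
-- stated objective: alternative
-- what changed: B finds the closest element by binary-searching the sorted list for price's insertion point and comparing the two neighbouring values (resolving an exact distance tie by the first occurrence in the original list), and binary-searches its rank, instead of A's linear min-scan with a key lambda over the whole list followed by a second linear enumerate scan of the sorted list; the three slice branches become one computed (lo, hi) slice.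
import Mathlib
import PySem

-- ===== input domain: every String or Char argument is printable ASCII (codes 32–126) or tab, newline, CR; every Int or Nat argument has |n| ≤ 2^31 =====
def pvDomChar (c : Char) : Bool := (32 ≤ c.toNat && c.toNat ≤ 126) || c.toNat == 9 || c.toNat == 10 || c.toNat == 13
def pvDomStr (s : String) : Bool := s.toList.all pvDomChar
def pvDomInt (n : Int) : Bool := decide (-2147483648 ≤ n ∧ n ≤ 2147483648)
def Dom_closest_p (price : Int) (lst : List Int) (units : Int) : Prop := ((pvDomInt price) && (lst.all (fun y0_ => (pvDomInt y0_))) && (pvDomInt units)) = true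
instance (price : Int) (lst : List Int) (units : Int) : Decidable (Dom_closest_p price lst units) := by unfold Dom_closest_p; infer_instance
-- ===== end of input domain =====

-- B sorts first and finds the closest element by BINARY SEARCH for price's insertion point
-- (comparing the two neighbours, ties resolved by first occurrence in the original list),
-- instead of A's linear min-scan with a key lambda followed by a linear position scan;
-- objective: alternative (same O(n log n) cost class; the sort dominates).

-- ===== PORT A =====
-- for i, data in enumerate(sort): if data == result: close_pos = i; break
-- (returns none when the loop falls through, i.e. close_pos stays "")
def pvFindPosA (sort : List Int) (result : Int) (i : Int) : Option Int :=
  match sort with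
  | [] => none
  | data :: rest => if data == result then some i else pvFindPosA rest result (i + 1)

def closest_p (price : Int) (lst : List Int) (units : Int) : List Int :=
  -- assert units <= len(lst): raises AssertionError outside Pre_, no effect on returned values
  match PySem.List.min? lst (fun x => |x - price|) with
  | none => []  -- Python: min([]) raises ValueError (excluded by Pre_)
  | some result =>
    let sort := PySem.List.sorted lst (fun x => x) false
    match pvFindPosA sort result 0 with
    | none => []  -- unreachable when min returned: Python would raise TypeError ('' - foo)
    | some close_pos =>
      if close_pos == 0 then
        PySem.List.slice sort none (some units)
      else if close_pos == (sort.length : Int) - 1 then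
        PySem.List.slice sort (some (-units)) none
      else
        -- devided = units/2 (float, exact for |units| ≤ 2^31):
        -- math.floor(devided) = units // 2, math.ceil(devided) = -((-units) // 2)
        let foo := PySem.Int.floordiv units 2
        let foo := if units > 6 then foo + 1 else foo
        PySem.List.slice sort (some (close_pos - foo))
          (some (close_pos + (-(PySem.Int.floordiv (-units) 2))))

-- ===== PORT B =====
-- _bisect_left(s, x): hand-written binary search, while lo < hi
def pvBis (s : List Int) (x : Int) (lo hi : Nat) : Nat :=
  if h : lo < hi then
    let mid := (lo + hi) / 2
    if s.getD mid 0 < x then pvBis s x (mid + 1) hi else pvBis s x lo mid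
  else lo
termination_by hi - lo
decreasing_by all_goals omega

-- next(x for x in lst if x == a or x == b) (none = StopIteration, unreachable under Pre_)
def pvFirstOf (lst : List Int) (a b : Int) : Option Int :=
  match lst with
  | [] => none
  | x :: t => if x == a || x == b then some x else pvFirstOf t a b

-- _closest_value(price, lst, s): neighbours of the insertion point of price
def pvClosestValue (price : Int) (lst : List Int) (s : List Int) : Int :=
  let n := s.length
  let i := pvBis s price 0 n
  if i = 0 then s.getD 0 0                -- s[0] (IndexError on [] is outside Pre_)
  else if i = n then s.getD (n - 1) 0     -- s[-1]
  else
    let a := s.getD (i - 1) 0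
    let b := s.getD i 0
    if price - a < b - price then a
    else if b - price < price - a then b
    else match pvFirstOf lst a b with
         | some x => x
         | none => 0                      -- unreachable: a is an element of lst

def closest_p_alt (price : Int) (lst : List Int) (units : Int) : List Int :=
  -- assert units <= len(lst): raises AssertionError outside Pre_, no effect on returned values
  let s := PySem.List.sorted lst (fun x => x) false
  let n : Int := s.length
  let v := pvClosestValue price lst s
  let rank : Int := (pvBis s v 0 s.length : Int)
  let lohi : Int × Int :=
    if rank = 0 then (0, units)
    else if rank = n - 1 then (-units, n)
    else
      let half := PySem.Int.floordiv units 2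
      (rank - half - (if units > 6 then 1 else 0), rank + (units - half))
  PySem.List.slice s (some lohi.1) (some lohi.2)

-- ===== PRECONDITION & SPEC =====
-- exactly where A returns: min([]) raises ValueError, and the assert rejects units > len(lst)
def Pre_closest_p (price : Int) (lst : List Int) (units : Int) : Prop :=
  lst ≠ [] ∧ units ≤ (lst.length : Int)
instance (price : Int) (lst : List Int) (units : Int) : Decidable (Pre_closest_p price lst units) := by
  unfold Pre_closest_p; infer_instance

def pvWitness_closest_p : Int × List Int × Int := (5, ([1, 4, 9], 2))

def Spec_closest_p (price : Int) (lst : List Int) (units : Int) (out : List Int) : Prop := out = closest_p_alt price lst units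
instance (price : Int) (lst : List Int) (units : Int) (out : List Int) : Decidable (Spec_closest_p price lst units out) := by unfold Spec_closest_p; infer_instance

-- ===== CLAIM (what is proved, stated in full; the proofs are below) =====
def Claim_equal_closest_p : Prop := ∀ (price : Int) (lst : List Int) (units : Int), Dom_closest_p price lst units → Pre_closest_p price lst units → Spec_closest_p price lst units (closest_p price lst units)

-- ===== LEMMAS AND PROOFS =====

-- on a sorted list containing r, A's break-loop finds i₀ + (#elements < r)
theorem pvFindPos_sorted (s : List Int) (r : Int) (i : Int)
    (hmem : r ∈ s) (hs : s.Pairwise (fun a b => a ≤ b)) :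
    pvFindPosA s r i = some (i + (s.countP (fun x => x < r) : Int)) := by
  induction s generalizing i with
  | nil => cases hmem
  | cons x t ih =>
    rcases List.pairwise_cons.mp hs with ⟨hx, ht⟩
    by_cases hxr : x = r
    · subst hxr
      have hcnt : t.countP (fun y => y < x) = 0 := by
        apply List.countP_eq_zero.mpr
        intro y hy
        simp only [decide_eq_true_eq]
        exact not_lt.mpr (hx y hy)
      simp [pvFindPosA, hcnt]
    · have hrt : r ∈ t := by
        rcases List.mem_cons.mp hmem with h | h
        · exact absurd h.symm hxr
        · exact h
      have hxltr : x < r := lt_of_le_of_ne (hx r hrt) hxr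
      rw [show pvFindPosA (x :: t) r i = pvFindPosA t r (i + 1) by
            simp [pvFindPosA, hxr]]
      rw [ih (i + 1) hrt ht]
      have : (x :: t).countP (fun y => y < r) = t.countP (fun y => y < r) + 1 := by
        simp [hxltr]
      rw [this]
      congr 1
      push_cast
      ring

-- sortedness at the level of getD indices
theorem pvMonoD (s : List Int) (hs : s.Pairwise (fun a b => a ≤ b)) {j k : Nat}
    (hjk : j ≤ k) (hk : k < s.length) : s.getD j 0 ≤ s.getD k 0 := by
  rcases eq_or_lt_of_le hjk with h | h
  · subst h; exact le_refl _
  · rw [List.getD_eq_getElem s 0 (lt_trans h hk), List.getD_eq_getElem s 0 hk]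
    exact List.pairwise_iff_getElem.mp hs j k _ _ h

-- the binary search maintains its invariant: everything left of the result is < x, the rest ≥ x
theorem pvBis_inv (s : List Int) (x : Int) (hs : s.Pairwise (fun a b => a ≤ b)) :
    ∀ (lo hi : Nat), hi ≤ s.length → lo ≤ hi →
    (∀ j, j < lo → s.getD j 0 < x) →
    (∀ j, hi ≤ j → j < s.length → x ≤ s.getD j 0) →
    pvBis s x lo hi ≤ s.length ∧
      (∀ j, j < pvBis s x lo hi → s.getD j 0 < x) ∧
      (∀ j, pvBis s x lo hi ≤ j → j < s.length → x ≤ s.getD j 0) := by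
  intro lo hi
  induction hlh : hi - lo using Nat.strong_induction_on generalizing lo hi with
  | _ d ih =>
    intro hhi hlohi hlow hhigh
    by_cases h : lo < hi
    · rw [pvBis, dif_pos h]
      set mid := (lo + hi) / 2 with hmid
      have hmlo : lo ≤ mid := by omega
      have hmhi : mid < hi := by omega
      by_cases hc : s.getD mid 0 < x
      · rw [if_pos hc]
        refine ih (hi - (mid + 1)) (by omega) (mid + 1) hi rfl hhi (by omega) ?_ hhigh
        intro j hj
        exact lt_of_le_of_lt (pvMonoD s hs (by omega) (by omega)) hc
      · rw [if_neg hc]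
        refine ih (mid - lo) (by omega) lo mid rfl (by omega) hmlo hlow ?_
        intro j hj hjlen
        exact le_trans (not_lt.mp hc) (pvMonoD s hs hj hjlen)
    · rw [pvBis, dif_neg h]
      have : lo = hi := by omega
      subst this
      exact ⟨hhi, hlow, hhigh⟩

theorem pvBis_spec (s : List Int) (x : Int) (hs : s.Pairwise (fun a b => a ≤ b)) :
    pvBis s x 0 s.length ≤ s.length ∧
      (∀ j, j < pvBis s x 0 s.length → s.getD j 0 < x) ∧
      (∀ j, pvBis s x 0 s.length ≤ j → j < s.length → x ≤ s.getD j 0) :=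
  pvBis_inv s x hs 0 s.length le_rfl (Nat.zero_le _) (fun j hj => absurd hj (Nat.not_lt_zero j))
    (fun j hj hjlen => absurd hjlen (not_lt.mpr hj))

-- a count from an index characterization
theorem pvCountOfSplit (x : Int) : ∀ (s : List Int) (r : Nat), r ≤ s.length →
    (∀ j, j < r → s.getD j 0 < x) →
    (∀ j, r ≤ j → j < s.length → ¬ s.getD j 0 < x) →
    s.countP (fun y => y < x) = r := by
  intro s
  induction s with
  | nil => intro r hr _ _; simp at hr; simp [hr]
  | cons y t ih =>
    intro r hr hlow hhigh
    cases r with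
    | zero =>
      have hy : ¬ y < x := by simpa using hhigh 0 (Nat.zero_le _) (by simp)
      have ht : t.countP (fun z => z < x) = 0 := by
        refine ih 0 (Nat.zero_le _) (fun j hj => absurd hj (Nat.not_lt_zero j)) ?_
        intro j _ hjlen
        simpa using hhigh (j + 1) (Nat.zero_le _) (by simpa using Nat.succ_lt_succ hjlen)
      simp [hy, ht]
    | succ r' =>
      have hy : y < x := by simpa using hlow 0 (Nat.succ_pos r')
      have ht : t.countP (fun z => z < x) = r' := by
        refine ih r' (by simpa using hr) ?_ ?_
        · intro j hj
          simpa using hlow (j + 1) (Nat.succ_lt_succ hj)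
        · intro j hj hjlen
          simpa using hhigh (j + 1) (Nat.succ_le_succ hj) (by simpa using Nat.succ_lt_succ hjlen)
      simp [hy, ht]

-- the binary search computes the rank: #elements < x
theorem pvBis_count (s : List Int) (x : Int) (hs : s.Pairwise (fun a b => a ≤ b)) :
    pvBis s x 0 s.length = s.countP (fun y => y < x) := by
  obtain ⟨h1, h2, h3⟩ := pvBis_spec s x hs
  exact (pvCountOfSplit x s _ h1 h2 (fun j hj hjlen => not_lt.mpr (h3 j hj hjlen))).symm

-- getD membership helpers
theorem pvGetDMem (s : List Int) {j : Nat} (hj : j < s.length) : s.getD j 0 ∈ s := by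
  rw [List.getD_eq_getElem s 0 hj]; exact List.getElem_mem hj

theorem pvMemIdx (s : List Int) {y : Int} (hy : y ∈ s) : ∃ j, ∃ _ : j < s.length, s.getD j 0 = y := by
  obtain ⟨j, hj, hje⟩ := List.mem_iff_getElem.mp hy
  exact ⟨j, hj, by rw [List.getD_eq_getElem s 0 hj]; exact hje⟩

-- the fold step of Python's min (proof helper)
def pvMinStep (key : Int → Int) (acc : Option Int) (x : Int) : Option Int :=
  match acc with
  | none => some x
  | some m => if key x < key m then some x else some m

-- once a minimal element is the accumulator, the min-fold keeps it
theorem pvFoldKeep (key : Int → Int) (m : Int) : ∀ (t : List Int),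
    (∀ y ∈ t, key m ≤ key y) →
    t.foldl (pvMinStep key) (some m) = some m := by
  intro t
  induction t with
  | nil => intro _; rfl
  | cons y t ih =>
    intro h
    have hy : ¬ key y < key m := not_lt.mpr (h y (List.mem_cons_self))
    simpa [pvMinStep, hy] using ih (fun z hz => h z (List.mem_cons_of_mem y hz))

-- in a tie between the two values a b (strictly better than everything else),
-- Python's min picks the first occurrence of either in list order
theorem pvMinTie (key : Int → Int) (a b : Int) (hab : key a = key b) :
    ∀ (lst : List Int) (acc : Option Int),
    (∀ y ∈ lst, (y = a ∨ y = b) ∨ key a < key y) →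
    (∀ m, acc = some m → key a < key m) →
    ∀ r, pvFirstOf lst a b = some r →
    lst.foldl (pvMinStep key) acc = some r := by
  intro lst
  induction lst with
  | nil => intro acc _ _ r hr; cases hr
  | cons x t ih =>
    intro acc hmem hacc r hr
    by_cases hx : x = a ∨ x = b
    · have hxr : r = x := by
        have : pvFirstOf (x :: t) a b = some x := by
          cases hx with
          | inl h => simp [pvFirstOf, h]
          | inr h => simp [pvFirstOf, h]
        rw [this] at hr; exact (Option.some.injEq _ _).mp hr.symm
      have hkx : key x = key a := by cases hx with
        | inl h => rw [h]
        | inr h => rw [h, hab]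
      have hstep : (x :: t).foldl (pvMinStep key) acc
          = t.foldl (pvMinStep key) (some x) := by
        cases acc with
        | none => rfl
        | some m =>
          have := hacc m rfl
          simp only [List.foldl_cons, pvMinStep]
          rw [if_pos (by rw [hkx]; exact this)]
      rw [hstep]
      have hkeep : List.foldl (pvMinStep key) (some x) t = some x := by
        apply pvFoldKeep
        intro y hy
        rw [hkx]
        rcases hmem y (List.mem_cons_of_mem x hy) with h | h
        · rcases h with h | h
          · rw [h]
          · rw [h, hab]
        · exact le_of_lt h
      rw [hkeep, hxr]
    · have hxa : x ≠ a := fun h => hx (Or.inl h)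
      have hxb : x ≠ b := fun h => hx (Or.inr h)
      have hkey : key a < key x := by
        rcases hmem x (List.mem_cons_self) with h | h
        · exact absurd h hx
        · exact h
      have hr' : pvFirstOf t a b = some r := by
        simpa [pvFirstOf, hxa, hxb] using hr
      have hstep : ∀ m', pvMinStep key acc x = some m' → key a < key m' := by
        intro m' hm'
        cases acc with
        | none =>
          simp only [pvMinStep, Option.some.injEq] at hm'
          rw [← hm']; exact hkey
        | some m =>
          dsimp only [pvMinStep] at hm'
          by_cases hlt : key x < key m
          · rw [if_pos hlt] at hm'
            simp only [Option.some.injEq] at hm'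
            rw [← hm']; exact hkey
          · rw [if_neg hlt] at hm'
            simp only [Option.some.injEq] at hm'
            rw [← hm']; exact hacc m rfl
      simpa using ih _ (fun y hy => hmem y (List.mem_cons_of_mem x hy)) hstep r hr'

theorem pvFirstOf_isSome (lst : List Int) (a b : Int) (ha : a ∈ lst) :
    ∃ r, pvFirstOf lst a b = some r := by
  induction lst with
  | nil => cases ha
  | cons x t ih =>
    by_cases hx : (x == a || x == b) = true
    · exact ⟨x, by simp only [pvFirstOf, hx, if_true]⟩

    · rcases List.mem_cons.mp ha with h | h
      · exfalso; simp at hx; exact hx.1 h.symm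
      · obtain ⟨r, hr⟩ := ih h
        exact ⟨r, by simp only [pvFirstOf, hx, if_false]; exact hr⟩

-- B's neighbour inspection computes exactly Python's min(lst, key=|x-price|)
theorem pvClosestValue_eq (price : Int) (lst : List Int) (result : Int)
    (hmin : PySem.List.min? lst (fun x => |x - price|) = some result) :
    pvClosestValue price lst (PySem.List.sorted lst (fun x => x) false) = result := by
  set key : Int → Int := fun x => |x - price| with hkey
  set s := PySem.List.sorted lst (fun x => x) false with hsdef
  have hperm : s.Perm lst := PySem.List.sorted_perm lst (fun x => x) false
  have hpair : s.Pairwise (fun a b => a ≤ b) := by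
    simpa using PySem.List.sorted_pairwise lst (fun x => x)
  have hrs : result ∈ s := (hperm.mem_iff).mpr (PySem.List.min?_mem hmin)
  have hlenpos : 0 < s.length := List.length_pos_of_mem hrs
  have hmins : ∀ y ∈ s, key result ≤ key y := fun y hy =>
    PySem.List.min?_isMin hmin y ((hperm.mem_iff).mp hy)
  obtain ⟨hle, hlow, hhigh⟩ := pvBis_spec s price hpair
  unfold pvClosestValue
  set i := pvBis s price 0 s.length with hi
  by_cases hi0 : i = 0
  · -- no element below price: the smallest element is closest
    rw [if_pos hi0]
    have hall : ∀ y ∈ s, price ≤ y := by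
      intro y hy
      obtain ⟨j, hj, hje⟩ := pvMemIdx s hy
      rw [← hje]; exact hhigh j (by omega) hj
    have h0m : s.getD 0 0 ∈ s := pvGetDMem s hlenpos
    have h1 : key result ≤ key (s.getD 0 0) := hmins _ h0m
    have h2 : s.getD 0 0 ≤ result := by
      obtain ⟨j, hj, hje⟩ := pvMemIdx s hrs
      rw [← hje]; exact pvMonoD s hpair (Nat.zero_le j) hj
    have ha1 : price ≤ s.getD 0 0 := hall _ h0m
    have ha2 : price ≤ result := hall _ hrs
    simp only [hkey] at h1
    rw [abs_of_nonneg (by omega), abs_of_nonneg (by omega)] at h1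
    omega
  · rw [if_neg hi0]
    by_cases hin : i = s.length
    · -- everything below price: the largest element is closest
      rw [if_pos hin]
      have hall : ∀ y ∈ s, y < price := by
        intro y hy
        obtain ⟨j, hj, hje⟩ := pvMemIdx s hy
        rw [← hje]; exact hlow j (by omega)
      have hlm : s.getD (s.length - 1) 0 ∈ s := pvGetDMem s (by omega)
      have h1 : key result ≤ key (s.getD (s.length - 1) 0) := hmins _ hlm
      have h2 : result ≤ s.getD (s.length - 1) 0 := by
        obtain ⟨j, hj, hje⟩ := pvMemIdx s hrs
        rw [← hje]; exact pvMonoD s hpair (by omega) (by omega)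
      have ha1 : s.getD (s.length - 1) 0 < price := hall _ hlm
      have ha2 : result < price := hall _ hrs
      simp only [hkey] at h1
      rw [abs_of_nonpos (by omega), abs_of_nonpos (by omega)] at h1
      omega
    · rw [if_neg hin]
      -- interior: a = s[i-1] < price ≤ b = s[i]
      have hipos : 0 < i := Nat.pos_of_ne_zero hi0
      have hilen : i < s.length := lt_of_le_of_ne hle hin
      set a := s.getD (i - 1) 0 with hadef
      set b := s.getD i 0 with hbdef
      have ham : a ∈ s := pvGetDMem s (by omega)
      have hbm : b ∈ s := pvGetDMem s hilen
      have hap : a < price := hlow (i - 1) (by omega)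
      have hpb : price ≤ b := hhigh i le_rfl hilen
      -- every element below price is ≤ a; every element ≥ price is ≥ b
      have hbelow : ∀ y ∈ s, y < price → y ≤ a := by
        intro y hy hyp
        obtain ⟨j, hj, hje⟩ := pvMemIdx s hy
        have hji : j < i := by
          by_contra hc
          exact absurd (hhigh j (by omega) hj) (by rw [hje]; omega)
        rw [← hje]; exact pvMonoD s hpair (by omega) (by omega)
      have habove : ∀ y ∈ s, price ≤ y → b ≤ y := by
        intro y hy hyp
        obtain ⟨j, hj, hje⟩ := pvMemIdx s hy
        have hji : i ≤ j := by
          by_contra hc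
          exact absurd (hlow j (by omega)) (by rw [hje]; omega)
        rw [← hje]; exact pvMonoD s hpair hji hj
      have hka : key a = price - a := by simp only [hkey]; rw [abs_of_nonpos (by omega)]; ring
      have hkb : key b = b - price := by simp only [hkey]; rw [abs_of_nonneg (by omega)]
      have hkey_below : ∀ y ∈ s, y < price → key a ≤ key y := by
        intro y hy hyp
        have h2 := hbelow y hy hyp
        simp only [hkey]
        rw [abs_of_nonpos (show a - price ≤ 0 by omega),
            abs_of_nonpos (show y - price ≤ 0 by omega)]
        omega
      have hkey_above : ∀ y ∈ s, price ≤ y → key b ≤ key y := by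
        intro y hy hyp
        have h2 := habove y hy hyp
        simp only [hkey]
        rw [abs_of_nonneg (show 0 ≤ b - price by omega),
            abs_of_nonneg (show 0 ≤ y - price by omega)]
        omega
      by_cases hc1 : price - a < b - price
      · -- a is strictly closer: the min's value is a
        rw [if_pos hc1]
        have h1 : key result ≤ key a := hmins a ham
        by_cases hrp : result < price
        · have h2 : key a ≤ key result := hkey_below result hrs hrp
          have := hbelow result hrs hrp
          rw [hka] at h1 h2
          simp only [hkey] at h1 h2
          rw [abs_of_nonpos (by omega)] at h1 h2
          omega
        · exfalso
          have h2 : key b ≤ key result := hkey_above result hrs (not_lt.mp hrp)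
          rw [hka] at h1; rw [hkb] at h2
          omega
      · rw [if_neg hc1]
        by_cases hc2 : b - price < price - a
        · -- b is strictly closer: the min's value is b
          rw [if_pos hc2]
          have h1 : key result ≤ key b := hmins b hbm
          by_cases hrp : price ≤ result
          · have h2 : key b ≤ key result := hkey_above result hrs hrp
            have := habove result hrs hrp
            rw [hkb] at h1 h2
            simp only [hkey] at h1 h2
            rw [abs_of_nonneg (by omega)] at h1 h2
            omega
          · exfalso
            have h2 : key a ≤ key result := hkey_below result hrs (not_le.mp hrp)
            rw [hkb] at h1; rw [hka] at h2
            omega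
        · -- tie: the min is the first occurrence of a or b in the original list
          rw [if_neg hc2]
          have htie : key a = key b := by rw [hka, hkb]; omega
          have hmem : ∀ y ∈ lst, (y = a ∨ y = b) ∨ key a < key y := by
            intro y hy
            have hys : y ∈ s := (hperm.mem_iff).mpr hy
            by_cases hyp : y < price
            · have h2 := hbelow y hys hyp
              rcases eq_or_lt_of_le h2 with h | h
              · exact Or.inl (Or.inl h)
              · refine Or.inr ?_
                rw [hka]
                simp only [hkey]
                rw [abs_of_nonpos (by omega)]
                omega
            · have h2 := habove y hys (not_lt.mp hyp)
              rcases eq_or_lt_of_le h2 with h | h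
              · exact Or.inl (Or.inr h.symm)
              · refine Or.inr ?_
                rw [htie, hkb]
                simp only [hkey]
                rw [abs_of_nonneg (by omega)]
                omega
          obtain ⟨r, hr⟩ := pvFirstOf_isSome lst a b ((hperm.mem_iff).mp ham)
          have := pvMinTie key a b htie lst none hmem (fun m hm => by cases hm) r hr
          have hrr : r = result := by
            have hbridge : PySem.List.min? lst key = List.foldl (pvMinStep key) none lst := by
              simp only [PySem.List.min?]
              exact List.foldl_ext _ _ none (fun acc x _ => by cases acc <;> rfl)
            have hm2 : PySem.List.min? lst key = some r := by rw [hbridge, this]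
            rw [hmin] at hm2
            exact ((Option.some.injEq _ _).mp hm2).symm
          rw [hr, hrr]

-- ceiling division: -((-u) // 2) = u - u // 2
theorem pvCeilHalf (u : Int) : -(PySem.Int.floordiv (-u) 2) = u - PySem.Int.floordiv u 2 := by
  have h2 : (0:Int) < 2 := by omega
  rw [PySem.Int.floordiv_eq_ediv_of_pos h2, PySem.Int.floordiv_eq_ediv_of_pos h2]
  omega

-- a slice whose stop is the full length is the slice to the end
theorem pvSliceToLen (xs : List Int) (a : Int) :
    PySem.List.slice xs (some a) (some (xs.length : Int)) = PySem.List.slice xs (some a) none := by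
  rw [PySem.List.slice_some_none]
  simp only [PySem.List.slice, PySem.List.clampIdx]
  split_ifs <;> simp <;> omega

-- ===== VERDICT (by name: the statement is the Claim_ definition above) =====
theorem closest_p_spec : Claim_equal_closest_p := by
  intro price lst units _hdom hpre
  obtain ⟨hne, _hu⟩ := hpre
  unfold Spec_closest_p closest_p closest_p_alt
  cases hmin : PySem.List.min? lst (fun x => |x - price|) with
  | none => exact absurd (((PySem.List.min?_eq_none_iff _ _).mp hmin)) hne
  | some result =>
    have hmem : result ∈ lst := PySem.List.min?_mem hmin
    set s := PySem.List.sorted lst (fun x => x) false with hsdef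
    have hperm : s.Perm lst := PySem.List.sorted_perm lst (fun x => x) false
    have hpair : s.Pairwise (fun a b => a ≤ b) := by
      simpa using PySem.List.sorted_pairwise lst (fun x => x)
    have hmem' : result ∈ s := (hperm.mem_iff).mpr hmem
    dsimp only
    rw [pvFindPos_sorted s result 0 hmem' hpair, pvClosestValue_eq price lst result hmin,
        pvBis_count s result hpair]
    simp only [zero_add]
    set rank : Int := (s.countP (fun x => decide (x < result)) : Int) with hrank
    by_cases h0 : rank = 0
    · simp [h0, PySem.List.slice_zero_start]
    · by_cases h1 : rank = (s.length : Int) - 1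
      · have hz : ¬ ((s.length : Int) - 1 = 0) := by rw [← h1]; exact h0
        simp only [beq_iff_eq, h1, hz, if_false, if_true]
        exact (pvSliceToLen s (-units)).symm
      · simp only [beq_iff_eq, if_neg h0, if_neg h1]
        rw [pvCeilHalf]
        by_cases h6 : units > 6 <;> simp [h6] <;> ring_nf
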